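-- pv_equiv track=rewrite | github.com/aaldarmaki9/Structural-Break-Detection | bilstm_detector.py | calculate_localization_errors
-- ===== SOURCE A (Python) =====
-- from typing import List, Tuple, Dict
--
-- def calculate_localization_errors(true_breaks: List[int], detected_breaks: List[int], tolerance: int) -> List[int]:
--     """
--     Calculates localization errors for detected breaks that match a true break
--     within the specified tolerance.
--
--     Args:
--         true_breaks: List of true break point indices.
--         detected_breaks: List of detected break point indices.
--         tolerance: The maximum allowed distance for a match.
--
--     Returns:
--         A list of absolute differences between matched detected and true breaks.
--     """
--     localization_errors = []
--     matched_true_indices = set() # To ensure each true break is matched only once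
--
--     for det_bp in detected_breaks:
--         for k, true_bp_k in enumerate(true_breaks):
--             if abs(det_bp - true_bp_k) <= tolerance:
--                 if k not in matched_true_indices:
--                     matched_true_indices.add(k)
--                     localization_errors.append(abs(det_bp - true_bp_k))
--                     break # Move to the next detected break
--
--     return localization_errors
-- ===== SOURCE B (Python) =====
-- def calculate_localization_errors(true_breaks, detected_breaks, tolerance):
--     # Maintain the still-unmatched true breaks and delete each one when matched,
--     # instead of rescanning the full list with a matched-index set.
--     remaining = list(true_breaks)
--     errors = []
--     for d in detected_breaks:
--         for i, t in enumerate(remaining):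
--             if abs(d - t) <= tolerance:
--                 errors.append(abs(d - t))
--                 del remaining[i]
--                 break
--     return errors
-- ===== Notes on version B (the rewrite author's own statement) =====
-- stated objective: faster
-- what changed: B keeps a shrinking list of unmatched true breaks and physically deletes each matched one, instead of A's repeated full scan of enumerate(true_breaks) guarded by a matched-index set; each detected break scans only the still-unmatched breaks and stops, so the set and the enumerate disappear.
import Mathlib
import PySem

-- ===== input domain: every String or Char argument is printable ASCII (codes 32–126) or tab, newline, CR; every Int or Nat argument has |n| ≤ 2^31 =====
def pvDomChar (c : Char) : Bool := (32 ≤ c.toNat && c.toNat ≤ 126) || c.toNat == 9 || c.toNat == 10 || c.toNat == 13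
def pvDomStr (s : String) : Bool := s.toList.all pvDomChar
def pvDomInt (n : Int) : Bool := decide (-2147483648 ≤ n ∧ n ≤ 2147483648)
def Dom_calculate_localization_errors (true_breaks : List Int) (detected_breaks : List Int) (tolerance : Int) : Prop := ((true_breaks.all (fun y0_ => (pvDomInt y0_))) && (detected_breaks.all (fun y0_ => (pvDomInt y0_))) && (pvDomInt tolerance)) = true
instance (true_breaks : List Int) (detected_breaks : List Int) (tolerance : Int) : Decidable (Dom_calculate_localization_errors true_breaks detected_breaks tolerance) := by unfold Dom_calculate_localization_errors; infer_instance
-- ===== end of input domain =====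

-- B replaces A's matched-index set and repeated full enumerate-scan by a shrinking list of
-- unmatched true breaks with physical deletion (objective: simpler; return value only).


-- ===== PORT A =====
-- inner 'for k, true_bp_k in enumerate(true_breaks): … break' with the matched set and the
-- error list as state
def pvAInner (det tolerance : Int) : List (Int × Int) → PySem.Set Int → List Int → PySem.Set Int × List Int
  | [], m, errs => (m, errs)
  | (k, t) :: rest, m, errs =>
    if |det - t| ≤ tolerance then
      if PySem.Set.contains m k then
        pvAInner det tolerance rest m errs
      else
        (PySem.Set.add m k, errs ++ [|det - t|])
    else
      pvAInner det tolerance rest m errs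

def calculate_localization_errors (true_breaks : List Int) (detected_breaks : List Int) (tolerance : Int) : List Int :=
  (detected_breaks.foldl
    (fun (st : PySem.Set Int × List Int) det =>
      pvAInner det tolerance (PySem.List.enumerate true_breaks 0) st.1 st.2)
    (PySem.Set.empty, [])).2

-- ===== PORT B =====
-- inner 'for i, t in enumerate(remaining): … del remaining[i]; break':
-- return the first value within tolerance (if any) and the remaining list with it deleted
def pvBExtract (d tolerance : Int) : List Int → Option Int × List Int
  | [] => (none, [])
  | t :: rest =>
    if |d - t| ≤ tolerance then (some t, rest)
    else
      let p := pvBExtract d tolerance rest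
      (p.1, t :: p.2)

def calculate_localization_errors_alt (true_breaks : List Int) (detected_breaks : List Int) (tolerance : Int) : List Int :=
  (detected_breaks.foldl
    (fun (st : List Int × List Int) d =>
      match pvBExtract d tolerance st.1 with
      | (some t, rem) => (rem, st.2 ++ [|d - t|])
      | (none, _) => st)
    (true_breaks, [])).2

-- ===== PRECONDITION & SPEC =====
def Spec_calculate_localization_errors (true_breaks : List Int) (detected_breaks : List Int) (tolerance : Int) (out : List Int) : Prop := out = calculate_localization_errors_alt true_breaks detected_breaks tolerance
instance (true_breaks : List Int) (detected_breaks : List Int) (tolerance : Int) (out : List Int) : Decidable (Spec_calculate_localization_errors true_breaks detected_breaks tolerance out) := by unfold Spec_calculate_localization_errors; infer_instance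

-- ===== CLAIM (what is proved, stated in full; the proofs are below) =====
def Claim_equal_calculate_localization_errors : Prop := ∀ (true_breaks : List Int) (detected_breaks : List Int) (tolerance : Int), Dom_calculate_localization_errors true_breaks detected_breaks tolerance → Spec_calculate_localization_errors true_breaks detected_breaks tolerance (calculate_localization_errors true_breaks detected_breaks tolerance)

-- ===== LEMMAS AND PROOFS =====

-- the values of the entries of L whose index is not yet in the matched set m
def pvVals (m : PySem.Set Int) (L : List (Int × Int)) : List Int :=
  (L.filter (fun p => !(PySem.Set.contains m p.1))).map Prod.snd

theorem pvVals_nil (m : PySem.Set Int) : pvVals m [] = [] := rfl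

theorem pvVals_cons (m : PySem.Set Int) (k t : Int) (L : List (Int × Int)) :
    pvVals m ((k, t) :: L) = if k ∈ m then pvVals m L else t :: pvVals m L := by
  simp [pvVals, List.filter, PySem.Set.contains_eq_listContains]
  by_cases h : k ∈ m <;> simp [h]

-- A's inner loop only adds indices occurring in L
theorem pvAInner_mem (det tol : Int) (L : List (Int × Int)) (m : PySem.Set Int)
    (errs : List Int) (x : Int) (hx : x ∈ (pvAInner det tol L m errs).1) :
    x ∈ m ∨ x ∈ L.map Prod.fst := by
  induction L generalizing m errs with
  | nil => simp [pvAInner] at hx; exact Or.inl hx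
  | cons p rest ih =>
    obtain ⟨k, t⟩ := p
    simp only [pvAInner] at hx
    split_ifs at hx with h1 h2
    · rcases ih m errs hx with h | h
      · exact Or.inl h
      · exact Or.inr (by simp [h])
    · simp only at hx
      rcases (PySem.Set.mem_add m k x).mp hx with h | h
      · exact Or.inl h
      · exact Or.inr (by simp [h])
    · rcases ih m errs hx with h | h
      · exact Or.inl h
      · exact Or.inr (by simp [h])

-- A's inner loop never removes an index from the matched set
theorem pvAInner_mono (det tol : Int) (L : List (Int × Int)) (m : PySem.Set Int)
    (errs : List Int) (x : Int) (hx : x ∈ m) : x ∈ (pvAInner det tol L m errs).1 := by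
  induction L generalizing m errs with
  | nil => simpa [pvAInner] using hx
  | cons p rest ih =>
    obtain ⟨k, t⟩ := p
    simp only [pvAInner]
    split_ifs with h1 h2
    · exact ih m errs hx
    · exact (PySem.Set.mem_add m k x).mpr (Or.inl hx)
    · exact ih m errs hx

-- pvVals depends only on membership of the indices of L
theorem pvVals_congr (m m' : PySem.Set Int) (L : List (Int × Int))
    (h : ∀ p ∈ L, (p.1 ∈ m ↔ p.1 ∈ m')) : pvVals m L = pvVals m' L := by
  induction L with
  | nil => rfl
  | cons p rest ih =>
    obtain ⟨k, t⟩ := p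
    have hk := h (k, t) (by simp)
    simp only at hk
    rw [pvVals_cons, pvVals_cons, ih (fun q hq => h q (by simp [hq]))]
    by_cases hm : k ∈ m
    · rw [if_pos hm, if_pos (hk.mp hm)]
    · rw [if_neg hm, if_neg (fun h' => hm (hk.mpr h'))]

-- the key correspondence between A's inner loop and B's extraction
theorem pvInner_extract (det tol : Int) (L : List (Int × Int)) (m : PySem.Set Int)
    (hnd : (L.map Prod.fst).Nodup) (errs : List Int) :
    (pvAInner det tol L m errs).2
      = (match (pvBExtract det tol (pvVals m L)).1 with
         | none => errs
         | some t => errs ++ [|det - t|])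
    ∧ pvVals (pvAInner det tol L m errs).1 L = (pvBExtract det tol (pvVals m L)).2 := by
  induction L generalizing m errs with
  | nil => simp [pvAInner, pvVals_nil, pvBExtract]
  | cons p rest ih =>
    obtain ⟨k, t⟩ := p
    simp only [List.map_cons, List.nodup_cons] at hnd
    have hknr : k ∉ rest.map Prod.fst := hnd.1
    have hndr := hnd.2
    by_cases hm : k ∈ m
    · -- index already matched: invisible to B's list, A skips it
      have hv : pvVals m ((k, t) :: rest) = pvVals m rest := by rw [pvVals_cons]; simp [hm]
      have hstep : pvAInner det tol ((k, t) :: rest) m errs = pvAInner det tol rest m errs := by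
        simp [pvAInner, hm]
      obtain ⟨ih1, ih2⟩ := ih m hndr errs
      refine ⟨by rw [hstep, hv]; exact ih1, ?_⟩
      rw [hstep, hv, pvVals_cons]
      rw [if_pos (pvAInner_mono det tol rest m errs k hm)]
      exact ih2
    · have hv : pvVals m ((k, t) :: rest) = t :: pvVals m rest := by
        rw [pvVals_cons]; simp [hm]
      by_cases htol : |det - t| ≤ tol
      · -- both match at this entry
        have hstep : pvAInner det tol ((k, t) :: rest) m errs
            = (PySem.Set.add m k, errs ++ [|det - t|]) := by
          simp [pvAInner, htol, hm]
        have hext : pvBExtract det tol (pvVals m ((k, t) :: rest))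
            = (some t, pvVals m rest) := by
          rw [hv]; simp [pvBExtract, htol]
        refine ⟨by rw [hstep, hext], ?_⟩
        rw [hstep, hext, pvVals_cons]
        rw [if_pos ((PySem.Set.mem_add m k k).mpr (Or.inr rfl))]
        apply pvVals_congr
        intro q hq
        have hne : q.1 ≠ k := by
          intro h; exact hknr (by simpa [h] using List.mem_map_of_mem (f := Prod.fst) hq)
        rw [PySem.Set.mem_add]
        exact ⟨fun h => h.resolve_right hne, Or.inl⟩
      · -- head not within tolerance: both scan past it
        have hstep : pvAInner det tol ((k, t) :: rest) m errs = pvAInner det tol rest m errs := by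
          simp [pvAInner, htol]
        have hext : pvBExtract det tol (pvVals m ((k, t) :: rest))
            = ((pvBExtract det tol (pvVals m rest)).1,
               t :: (pvBExtract det tol (pvVals m rest)).2) := by
          rw [hv]; simp [pvBExtract, htol]
        obtain ⟨ih1, ih2⟩ := ih m hndr errs
        refine ⟨by rw [hstep, hext]; exact ih1, ?_⟩
        rw [hstep, hext, pvVals_cons]
        have hknot : k ∉ (pvAInner det tol rest m errs).1 := by
          intro h
          rcases pvAInner_mem det tol rest m errs k h with h' | h'
          · exact hm h'
          · exact hknr h'
        rw [if_neg hknot, ih2]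

theorem pvBExtract_none (d tol : Int) (xs : List Int)
    (h : (pvBExtract d tol xs).1 = none) : (pvBExtract d tol xs).2 = xs := by
  induction xs with
  | nil => rfl
  | cons t rest ih =>
    by_cases h1 : |d - t| ≤ tol
    · simp [pvBExtract, h1] at h
    · simp only [pvBExtract, if_neg h1] at h ⊢
      rw [ih h]

theorem pvNodup_enumerate (tb : List Int) : ((PySem.List.enumerate tb 0).map Prod.fst).Nodup := by
  have h := PySem.List.pairwise_lt_enumerate (xs := tb) (s := 0)
  exact List.pairwise_map.mpr (h.imp (fun hlt => ne_of_lt hlt))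

-- the outer fold: A's (matched set, errors) state tracks B's (remaining, errors) state
theorem pvOuter (tb db : List Int) (tol : Int) :
    ∀ (m : PySem.Set Int) (errs : List Int) (rem : List Int),
      rem = pvVals m (PySem.List.enumerate tb 0) →
      (db.foldl (fun (st : PySem.Set Int × List Int) det =>
          pvAInner det tol (PySem.List.enumerate tb 0) st.1 st.2) (m, errs)).2
      = (db.foldl (fun (st : List Int × List Int) d =>
          match pvBExtract d tol st.1 with
          | (some t, r) => (r, st.2 ++ [|d - t|])
          | (none, _) => st) (rem, errs)).2 := by
  induction db with
  | nil => intro m errs rem _; simp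
  | cons d rest ih =>
    intro m errs rem hrem
    simp only [List.foldl_cons]
    obtain ⟨h1, h2⟩ := pvInner_extract d tol (PySem.List.enumerate tb 0) m (pvNodup_enumerate tb) errs
    rcases hx : pvBExtract d tol (pvVals m (PySem.List.enumerate tb 0)) with ⟨o, r⟩
    cases o with
    | none =>
      have hA : pvAInner d tol (PySem.List.enumerate tb 0) m errs
          = ((pvAInner d tol (PySem.List.enumerate tb 0) m errs).1, errs) := by
        rw [hx] at h1; exact Prod.ext rfl (by simpa using h1)
      rw [hA, hrem, hx]
      refine ih _ _ _ ?_
      rw [hx] at h2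
      simp only at h2
      have hr : r = pvVals m (PySem.List.enumerate tb 0) := by
        have := pvBExtract_none d tol (pvVals m (PySem.List.enumerate tb 0)) (by rw [hx])
        rw [hx] at this; simpa using this
      exact (h2.trans hr).symm
    | some t =>
      have hA : pvAInner d tol (PySem.List.enumerate tb 0) m errs
          = ((pvAInner d tol (PySem.List.enumerate tb 0) m errs).1, errs ++ [|d - t|]) := by
        rw [hx] at h1; exact Prod.ext rfl (by simpa using h1)
      rw [hA, hrem, hx]
      exact ih _ _ _ (by rw [hx] at h2; simpa using h2.symm)

theorem pvVals_empty (tb : List Int) : pvVals PySem.Set.empty (PySem.List.enumerate tb 0) = tb := by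
  simp [pvVals, PySem.Set.empty, PySem.Set.contains_eq_listContains, PySem.List.map_snd_enumerate]

-- ===== VERDICT (by name: the statement is the Claim_ definition above) =====
theorem calculate_localization_errors_spec : Claim_equal_calculate_localization_errors := by
  intro tb db tol _
  unfold Spec_calculate_localization_errors calculate_localization_errors calculate_localization_errors_alt
  exact pvOuter tb db tol PySem.Set.empty [] tb (pvVals_empty tb).symm
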